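/- PORTED by tools/port_fixed.py from Prog/Jsmn/D/ScanLemmas.lean to THE FIXED IMAGE fixed/jsmn_d.bin (same bytes at the same addresses; binFDc). Do not edit: edit the original and port again. -/
/-
  jsmn_d.bin: what the four backward scans over the token array in `jsmn_parse` share (Prog/Jsmn/D/ParseClose.lean, ParseComma.lean,
  ParseFinal.lean).
    * the model side: `scanOpen` / `scanOpenContainer` one step at a time, and what `Jsmn.body` is for `}` `]` and `,`;
    * memory ↔ model: "the token is open" as the machine tests it (raw start ≠ FFFFFFFFH, raw end = FFFFFFFFH);
    * `FrameCore` moved to a view whose memory and argument registers are the same.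
-/
import Prog.Jsmn.Fixed.Specs
import Prog.Jsmn.Fixed.CodeFD
import Prog.Jsmn.Fixed.D.ParseLemmas
namespace X86
namespace J6
namespace FD
open X86.User (CodeAt RegsKept Span FlagsOK Layout toNat_add_ofNat toNat_ofNat_lt' add_ofNat_add)
open Jsmn

set_option maxRecDepth 100000
set_option maxHeartbeats 4000000
set_option linter.unusedSimpArgs false
set_option linter.unusedVariables false

/-! ### The model side -/

/-- `start != -1 && end == -1` on the raw 32-bit patterns. -/
theorem isOpen_raw {t : Token} {rs re : Nat} (hs : Holds32 rs t.start) (he : Holds32 re t.«end») :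
    t.isOpen = true ↔ rs ≠ 4294967295 ∧ re = 4294967295 := by
  obtain ⟨h1, h2, h3⟩ := hs
  obtain ⟨h4, h5, h6⟩ := he
  unfold u32 at h1 h4
  simp only [Token.isOpen, Bool.and_eq_true, bne_iff_ne, ne_eq, beq_iff_eq]
  omega

theorem scanOpen_succ_open {ts : Tokens} {j : Nat} (h : (ts.getD j default).isOpen = true) : scanOpen ts (j + 1) = some j := by
  simp only [scanOpen]; rw [if_pos h]

theorem scanOpen_succ_closed {ts : Tokens} {j : Nat} (h : ¬ (ts.getD j default).isOpen = true) : scanOpen ts (j + 1) = scanOpen ts j := by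
  simp only [scanOpen]; rw [if_neg h]

theorem scanOpenContainer_succ_hit {ts : Tokens} {j : Nat}
    (h : ((ts.getD j default).type = 2 ∨ (ts.getD j default).type = 1) ∧ (ts.getD j default).isOpen = true) :
    scanOpenContainer ts (j + 1) = some j := by
  simp only [scanOpenContainer, JSMN_ARRAY, JSMN_OBJECT]
  rw [if_pos]
  simpa using h

theorem scanOpenContainer_succ_miss {ts : Tokens} {j : Nat}
    (h : ¬ (((ts.getD j default).type = 2 ∨ (ts.getD j default).type = 1) ∧ (ts.getD j default).isOpen = true)) :
    scanOpenContainer ts (j + 1) = scanOpenContainer ts j := by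
  simp only [scanOpenContainer, JSMN_ARRAY, JSMN_OBJECT]
  rw [if_neg]
  simpa using h

/-- `(int)(toknext - 1)` for a `toknext` that fits the array (`Inv`): no wrap. -/
theorem i32_pred {k : Nat} (h : k ≤ 2147483648) : i32 ((k : Int) - 1) = (k : Int) - 1 := by unfold i32; omega

/-- The 32-bit pattern of `j - 1` for `j ≥ 1`. -/
theorem u32_pred_succ (j : Nat) (h : j < 4294967296) : u32 (((j + 1 : Nat) : Int) - 1) = j := by unfold u32; omega

theorem u32_pred_zero : u32 (((0 : Nat) : Int) - 1) = 4294967295 := by unfold u32; omega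

/-! ### `FrameCore` at a later view -/

/-- The frame at a view with the same memory and the same five argument registers. -/
theorem FrameCore.of_mem_eq {c : PCtx} {n : User.Layout} {v0 v v' : User.State} {p : Parser} {toks : Option Tokens} (h : FrameCore c n v0 v p toks)
    (hm : v'.mem = v.mem) (hsp : v'.reg .rsp = v.reg .rsp) (hbp : v'.reg .rbp = v.reg .rbp) (h14 : v'.reg .r14 = v.reg .r14)
    (h13 : v'.reg .r13 = v.reg .r13) (h12 : v'.reg .r12 = v.reg .r12) : FrameCore c n v0 v' p toks := by
  refine ⟨h.entry, hsp ▸ h.rsp, hbp ▸ h.rbp, h14 ▸ h.r14, h13 ▸ h.r13, h12 ▸ h.r12, hm ▸ h.ntok, hm ▸ h.sv15, hm ▸ h.sv14, hm ▸ h.sv13, hm ▸ h.sv12,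
    hm ▸ h.svbp, hm ▸ h.svbx, hm ▸ h.retA, hm ▸ h.same, hm ▸ h.parser, hm ▸ h.toksArg, h.null⟩

/-- `Frame` at a view with the same memory, the same five argument registers and the same r15. -/
theorem Frame.of_mem_eq {c : PCtx} {n : User.Layout} {v0 v v' : User.State} {s : St} (h : Frame c n v0 v s)
    (hm : v'.mem = v.mem) (hsp : v'.reg .rsp = v.reg .rsp) (hbp : v'.reg .rbp = v.reg .rbp) (h14 : v'.reg .r14 = v.reg .r14)
    (h13 : v'.reg .r13 = v.reg .r13) (h12 : v'.reg .r12 = v.reg .r12) (h15 : v'.reg .r15 = v.reg .r15) : Frame c n v0 v' s :=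
  ⟨h.core.of_mem_eq hm hsp hbp h14 h13 h12, h15 ▸ h.r15, h.cnt, h.inv⟩

/-- With a token array, its size in bytes is `16 * num_tokens`. -/
theorem FrameCore.tlen_some {c : PCtx} {n : User.Layout} {v0 v : User.State} {p : Parser} {ts : Tokens} (h : FrameCore c n v0 v p (some ts)) :
    toksBytes Config.default c.numTokens c.toks0 = 16 * c.numTokens := by
  cases h0 : c.toks0 with
  | none => exact absurd (h.null.mpr h0) (by simp)
  | some _ => rfl

/-- `FrameCore` after ONE 4-byte store inside the token array: everything but the tokens is carried over (the new `TokensAt` is proved at the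
place of use, with `TokensAt.update`). The counterpart of `FrameCore.store_parser` (Prog/Jsmn/D/ParseLemmas.lean). -/
theorem FrameCore.store_token {c : PCtx} {n : User.Layout} {v0 v v' : User.State} {p : Parser} {ts ts' : Tokens} {a : Word} {x : Nat}
    (h : FrameCore c n v0 v p (some ts)) (hm : v'.mem = v.mem.writeLE a 4 x) (hk : RegsKept scratch v v')
    (ha : c.tb.toNat ≤ a.toNat ∧ a.toNat + 4 ≤ c.tb.toNat + 16 * c.numTokens)
    (hl : ts'.length = c.numTokens) (ht : TokensAt Config.default v'.mem c.tb ts') : FrameCore c n v0 v' p (some ts') := by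
  have htl := h.tlen_some
  have htb := h.toksArg.1
  obtain ⟨ha1, ha2⟩ := ha
  have he := h.entry.pre.env
  have hc := h.entry.pre.call
  have h_same := h.same
  have hpa := h.parser
  have hW := h.entry.pre.toksW
  v3_open he hc hW
  j6f_bin
  unfold dataWins PCtx.tlen at h_same
  rw [htl] at hW_hi hW_img hW_stk he_parserToks he_jsToks h_same
  refine ⟨h.entry, ?_, ?_, ?_, ?_, ?_, ?_, ?_, ?_, ?_, ?_, ?_, ?_, ?_, ?_, ?_, ⟨htb, hl, ht⟩, ?_⟩
  · rw [hk .rsp rfl]; exact h.rsp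
  · rw [hk .rbp rfl]; exact h.rbp
  · rw [hk .r14 rfl]; exact h.r14
  · rw [hk .r13 rfl]; exact h.r13
  · rw [hk .r12 rfl]; exact h.r12
  · rw [hm]; v3_frame h.ntok
  · rw [hm]; v3_frame h.sv15
  · rw [hm]; v3_frame h.sv14
  · rw [hm]; v3_frame h.sv13
  · rw [hm]; v3_frame h.sv12
  · rw [hm]; v3_frame h.svbp
  · rw [hm]; v3_frame h.svbx
  · rw [hm]; v3_frame h.retA
  · rw [hm]; unfold dataWins PCtx.tlen; rw [htl]; v3_same
  · rw [hm]; v3_frame hpa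
  · have := h.null; simp only [reduceCtorEq, false_iff] at this ⊢; exact this

/-- `FrameCore` after the two stores of the closing bracket (`parser->toksuper = -1 ; token->end = pos + 1`): one inside the parser struct, then one
inside the token array. The new `ParserAt` and `TokensAt` are proved at the place of use. -/
theorem FrameCore.store_super_token {c : PCtx} {n : User.Layout} {v0 v v' : User.State} {p p' : Parser} {ts ts' : Tokens} {b : Word} {x y : Nat}
    (h : FrameCore c n v0 v p (some ts)) (hm : v'.mem = (v.mem.writeLE (c.pa + 8) 4 x).writeLE b 4 y) (hk : RegsKept scratch v v')
    (hb : c.tb.toNat ≤ b.toNat ∧ b.toNat + 4 ≤ c.tb.toNat + 16 * c.numTokens)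
    (hp : ParserAt v'.mem c.pa p') (hl : ts'.length = c.numTokens) (ht : TokensAt Config.default v'.mem c.tb ts') :
    FrameCore c n v0 v' p' (some ts') := by
  have htl := h.tlen_some
  have htb := h.toksArg.1
  obtain ⟨hb1, hb2⟩ := hb
  have he := h.entry.pre.env
  have hc := h.entry.pre.call
  have h_same := h.same
  have hW := h.entry.pre.toksW
  v3_open he hc hW
  j6f_bin
  unfold dataWins PCtx.tlen at h_same
  rw [htl] at hW_hi hW_img hW_stk he_parserToks he_jsToks h_same
  refine ⟨h.entry, ?_, ?_, ?_, ?_, ?_, ?_, ?_, ?_, ?_, ?_, ?_, ?_, ?_, ?_, hp, ⟨htb, hl, ht⟩, ?_⟩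
  · rw [hk .rsp rfl]; exact h.rsp
  · rw [hk .rbp rfl]; exact h.rbp
  · rw [hk .r14 rfl]; exact h.r14
  · rw [hk .r13 rfl]; exact h.r13
  · rw [hk .r12 rfl]; exact h.r12
  · rw [hm]; v3_frame h.ntok
  · rw [hm]; v3_frame h.sv15
  · rw [hm]; v3_frame h.sv14
  · rw [hm]; v3_frame h.sv13
  · rw [hm]; v3_frame h.sv12
  · rw [hm]; v3_frame h.svbp
  · rw [hm]; v3_frame h.svbx
  · rw [hm]; v3_frame h.retA
  · rw [hm]; unfold dataWins PCtx.tlen; rw [htl]; v3_same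
  · have := h.null; simp only [reduceCtorEq, false_iff] at this ⊢; exact this

end FD
end J6
end X86
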